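-- pv_equiv track=rewrite | github.com/RomatecCRMWatsApp/AvalieImob | backend/pdf/recibo_pdf.py | _format_documento
-- ===== SOURCE A (Python) =====
-- def _format_documento(doc: str) -> str:
--     """Aplica máscara CPF ou CNPJ baseado no número de dígitos."""
--     if not doc:
--         return ""
--     digits = "".join(c for c in doc if c.isdigit())
--     if len(digits) == 11:
--         return f"{digits[0:3]}.{digits[3:6]}.{digits[6:9]}-{digits[9:11]}"
--     if len(digits) == 14:
--         return f"{digits[0:2]}.{digits[2:5]}.{digits[5:8]}/{digits[8:12]}-{digits[12:14]}"
--     return doc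
-- ===== SOURCE B (Python) =====
-- def _format_documento(doc: str) -> str:
--     if not doc:
--         return ""
--     digits = [c for c in doc if c.isdigit()]
--     templates = {11: "###.###.###-##", 14: "##.###.###/####-##"}
--     tpl = templates.get(len(digits))
--     if tpl is None:
--         return doc
--     it = iter(digits)
--     return "".join(next(it) if ch == "#" else ch for ch in tpl)
-- ===== Notes on version B (the rewrite author's own statement) =====
-- stated objective: alternative
-- what changed: Replaces the hard-coded slice-and-concatenate f-strings with a data-driven template fill: the two masks are stored as template strings and one generic loop substitutes the extracted digits for the placeholder positions.
import Mathlib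
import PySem

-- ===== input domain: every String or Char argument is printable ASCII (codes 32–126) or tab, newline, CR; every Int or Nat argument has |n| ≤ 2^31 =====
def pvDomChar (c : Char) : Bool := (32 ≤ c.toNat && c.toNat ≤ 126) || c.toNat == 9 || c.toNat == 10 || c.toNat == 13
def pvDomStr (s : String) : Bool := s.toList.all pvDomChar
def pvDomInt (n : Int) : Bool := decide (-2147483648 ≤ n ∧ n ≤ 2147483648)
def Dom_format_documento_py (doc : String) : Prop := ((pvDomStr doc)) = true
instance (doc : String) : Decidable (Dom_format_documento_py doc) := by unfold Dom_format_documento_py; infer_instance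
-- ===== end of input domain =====

-- B replaces A's hard-coded slice-and-concatenate formatting with a data-driven
-- template fill ('#' placeholders consumed left to right); same cost, alternative structure.

-- ===== PORT A =====
-- literal transliteration of A: empty guard, digit filter, slice-based f-strings
def format_documento_py (doc : String) : String :=
  if doc.toList = [] then ""
  else
    let digits : List Char := doc.toList.filter PySem.Chars.isdigit
    if digits.length = 11 then
      String.ofList (PySem.List.slice digits (some 0) (some 3) ++ ['.']
        ++ PySem.List.slice digits (some 3) (some 6) ++ ['.']
        ++ PySem.List.slice digits (some 6) (some 9) ++ ['-']
        ++ PySem.List.slice digits (some 9) (some 11))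
    else if digits.length = 14 then
      String.ofList (PySem.List.slice digits (some 0) (some 2) ++ ['.']
        ++ PySem.List.slice digits (some 2) (some 5) ++ ['.']
        ++ PySem.List.slice digits (some 5) (some 8) ++ ['/']
        ++ PySem.List.slice digits (some 8) (some 12) ++ ['-']
        ++ PySem.List.slice digits (some 12) (some 14))
    else doc

-- ===== PORT B =====
-- fill a template: each '#' consumes the next extracted digit, literals pass through
def pvFill : List Char → List Char → List Char
  | [], _ => []
  | ch :: t, ds =>
    if ch = '#' then
      match ds with
      | d :: ds' => d :: pvFill t ds'
      | [] => pvFill t []   -- unreachable: each template has as many '#' as digits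
    else ch :: pvFill t ds

def format_documento_py_alt (doc : String) : String :=
  if doc.toList = [] then ""
  else
    let digits : List Char := doc.toList.filter PySem.Chars.isdigit
    let templates : PySem.Dict Nat String :=
      PySem.Dict.ofList [(11, "###.###.###-##"), (14, "##.###.###/####-##")]
    match PySem.Dict.get? templates digits.length with
    | none => doc
    | some tpl => String.ofList (pvFill tpl.toList digits)

-- ===== PRECONDITION & SPEC =====
def Spec_format_documento_py (doc : String) (out : String) : Prop := out = format_documento_py_alt doc
instance (doc : String) (out : String) : Decidable (Spec_format_documento_py doc out) := by unfold Spec_format_documento_py; infer_instance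

-- ===== CLAIM (what is proved, stated in full; the proofs are below) =====
def Claim_equal_format_documento_py : Prop := ∀ (doc : String), Dom_format_documento_py doc → Spec_format_documento_py doc (format_documento_py doc)

-- ===== LEMMAS AND PROOFS =====

lemma pvFill_eleven (ds : List Char) (h : ds.length = 11) :
    pvFill "###.###.###-##".toList ds =
      PySem.List.slice ds (some 0) (some 3) ++ ['.']
        ++ PySem.List.slice ds (some 3) (some 6) ++ ['.']
        ++ PySem.List.slice ds (some 6) (some 9) ++ ['-']
        ++ PySem.List.slice ds (some 9) (some 11) := by
  rcases ds with _|⟨a0,ds⟩; · simp at h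
  rcases ds with _|⟨a1,ds⟩; · simp at h
  rcases ds with _|⟨a2,ds⟩; · simp at h
  rcases ds with _|⟨a3,ds⟩; · simp at h
  rcases ds with _|⟨a4,ds⟩; · simp at h
  rcases ds with _|⟨a5,ds⟩; · simp at h
  rcases ds with _|⟨a6,ds⟩; · simp at h
  rcases ds with _|⟨a7,ds⟩; · simp at h
  rcases ds with _|⟨a8,ds⟩; · simp at h
  rcases ds with _|⟨a9,ds⟩; · simp at h
  rcases ds with _|⟨a10,ds⟩; · simp at h
  rcases ds with _|⟨a11,ds⟩
  · rfl
  · simp at h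

lemma pvFill_fourteen (ds : List Char) (h : ds.length = 14) :
    pvFill "##.###.###/####-##".toList ds =
      PySem.List.slice ds (some 0) (some 2) ++ ['.']
        ++ PySem.List.slice ds (some 2) (some 5) ++ ['.']
        ++ PySem.List.slice ds (some 5) (some 8) ++ ['/']
        ++ PySem.List.slice ds (some 8) (some 12) ++ ['-']
        ++ PySem.List.slice ds (some 12) (some 14) := by
  rcases ds with _|⟨a0,ds⟩; · simp at h
  rcases ds with _|⟨a1,ds⟩; · simp at h
  rcases ds with _|⟨a2,ds⟩; · simp at h
  rcases ds with _|⟨a3,ds⟩; · simp at h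
  rcases ds with _|⟨a4,ds⟩; · simp at h
  rcases ds with _|⟨a5,ds⟩; · simp at h
  rcases ds with _|⟨a6,ds⟩; · simp at h
  rcases ds with _|⟨a7,ds⟩; · simp at h
  rcases ds with _|⟨a8,ds⟩; · simp at h
  rcases ds with _|⟨a9,ds⟩; · simp at h
  rcases ds with _|⟨a10,ds⟩; · simp at h
  rcases ds with _|⟨a11,ds⟩; · simp at h
  rcases ds with _|⟨a12,ds⟩; · simp at h
  rcases ds with _|⟨a13,ds⟩; · simp at h
  rcases ds with _|⟨a14,ds⟩
  · rfl
  · simp at h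

-- ===== VERDICT (by name: the statement is the Claim_ definition above) =====
theorem format_documento_py_spec : Claim_equal_format_documento_py := by
  intro doc _
  show format_documento_py doc = format_documento_py_alt doc
  unfold format_documento_py format_documento_py_alt
  by_cases hnil : doc.toList = []
  · simp [hnil]
  · simp only [if_neg hnil]
    set digits := doc.toList.filter PySem.Chars.isdigit with hd
    by_cases h11 : digits.length = 11
    · rw [if_pos h11, h11]
      have ht : PySem.Dict.get?
          (PySem.Dict.ofList [((11:Nat), "###.###.###-##"), (14, "##.###.###/####-##")]) 11
          = some "###.###.###-##" := rfl
      rw [ht]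
      exact congrArg String.ofList (pvFill_eleven digits h11).symm
    · rw [if_neg h11]
      by_cases h14 : digits.length = 14
      · rw [if_pos h14, h14]
        have ht : PySem.Dict.get?
            (PySem.Dict.ofList [((11:Nat), "###.###.###-##"), (14, "##.###.###/####-##")]) 14
            = some "##.###.###/####-##" := rfl
        rw [ht]
        exact congrArg String.ofList (pvFill_fourteen digits h14).symm
      · rw [if_neg h14]
        have ht : PySem.Dict.get?
            (PySem.Dict.ofList [((11:Nat), "###.###.###-##"), (14, "##.###.###/####-##")])
            digits.length = none := by
          simp [PySem.Dict.get?, PySem.Dict.ofList, PySem.Dict.update, PySem.Dict.insert,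
            PySem.Dict.empty]
          exact ⟨fun h => h11 h.symm, fun h => h14 h.symm⟩
        rw [ht]
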